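-- pv_equiv track=rewrite | github.com/knutae/adventofcode | 2021/21/solve.py | quantum_step
-- ===== SOURCE A (Python) =====
-- from collections import defaultdict
--
-- def move(position, amount):
--     return (position - 1 + amount) % 10 + 1
--
-- def quantum_dice_moves(position):
--     # 1/1/1: 1 combo
--     yield move(position, 3), 1
--     # 1/1/2: 3 combos
--     yield move(position, 4), 3
--     # 1/2/2 and 1/1/3: 6 combos
--     yield move(position, 5), 6
--     # 2/2/2 and 1/2/3: 7 combos
--     yield move(position, 6), 7
--     # 2/2/3 and 1/3/3: 6 combos
--     yield move(position, 7), 6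
--     # 2/3/3: 3 combos
--     yield move(position, 8), 3
--     # 3/3/3: 1 combo
--     yield move(position, 9), 1
--
-- def quantum_step(universes):
--     next_universes = defaultdict(int)
--     for key, count in universes.items():
--         a_turn, a_pos, a_score, b_pos, b_score = key
--         assert a_score < 21 and b_score < 21
--         if a_turn:
--             for new_pos, new_count in quantum_dice_moves(a_pos):
--                 next_universes[(False, new_pos, a_score + new_pos, b_pos, b_score)] += count * new_count
--         else:
--             for new_pos, new_count in quantum_dice_moves(b_pos):
--                 next_universes[(True, a_pos, a_score, new_pos, b_score + new_pos)] += count * new_count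
--     return next_universes
-- ===== SOURCE B (Python) =====
-- from collections import defaultdict
--
-- def move(position, amount):
--     return (position - 1 + amount) % 10 + 1
--
-- def quantum_step(universes):
--     contributions = []
--     for key, count in universes.items():
--         a_turn, a_pos, a_score, b_pos, b_score = key
--         assert a_score < 21 and b_score < 21
--         for d1 in (1, 2, 3):
--             for d2 in (1, 2, 3):
--                 for d3 in (1, 2, 3):
--                     p = move(a_pos if a_turn else b_pos, d1 + d2 + d3)
--                     if a_turn:
--                         new_key = (False, p, a_score + p, b_pos, b_score)
--                     else:
--                         new_key = (True, a_pos, a_score, p, b_score + p)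
--                     contributions.append((new_key, count))
--     next_universes = defaultdict(int)
--     for key, count in contributions:
--         next_universes[key] += count
--     return next_universes
-- ===== Notes on version B (the rewrite author's own statement) =====
-- stated objective: alternative
-- what changed: B replaces A's precomputed 7-entry (sum, combination-count) dice table with a two-phase pipeline: it first enumerates all 27 raw (d1,d2,d3) dice rolls per universe into a flat contribution list with weight count each, then aggregates that list into the defaultdict in a single separate pass; the equivalence rests on the proved fact that merging later same-key contributions into the first occurrence preserves the dict (value and insertion order).
import Mathlib
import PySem

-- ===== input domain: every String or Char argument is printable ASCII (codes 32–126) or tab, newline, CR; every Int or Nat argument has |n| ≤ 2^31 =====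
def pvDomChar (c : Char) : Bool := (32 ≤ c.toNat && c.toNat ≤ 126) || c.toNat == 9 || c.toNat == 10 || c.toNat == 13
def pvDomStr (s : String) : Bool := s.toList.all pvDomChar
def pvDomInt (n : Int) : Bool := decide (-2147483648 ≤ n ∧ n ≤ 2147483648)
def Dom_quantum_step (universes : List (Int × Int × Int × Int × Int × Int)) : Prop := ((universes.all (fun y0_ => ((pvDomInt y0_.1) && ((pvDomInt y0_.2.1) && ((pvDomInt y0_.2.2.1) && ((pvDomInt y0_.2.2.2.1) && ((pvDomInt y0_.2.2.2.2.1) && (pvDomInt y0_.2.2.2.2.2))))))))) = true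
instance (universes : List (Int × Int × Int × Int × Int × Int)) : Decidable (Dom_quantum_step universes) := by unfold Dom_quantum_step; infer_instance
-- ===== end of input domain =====

-- B replaces A's precomputed 7-entry (sum, combo-count) dice table with a two-phase pipeline — enumerate all
-- 27 raw dice rolls into a flat contribution list, then aggregate it into the dict in a second pass ('alternative').

-- A universe key (a_turn, a_pos, a_score, b_pos, b_score) of the OUTPUT dict (a_turn already a bool there).
abbrev QKey : Type := Bool × Int × Int × Int × Int

-- `d[k] += v` on a Python defaultdict(int): missing key defaults to 0; overwrite keeps the key's position (exact).
def ddAdd (d : PySem.Dict QKey Int) (k : QKey) (v : Int) : PySem.Dict QKey Int :=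
  d.insert k (d.getD k 0 + v)

-- ===== PORT A =====
def moveP (position : Int) (amount : Int) : Int :=
  PySem.Int.mod (position - 1 + amount) 10 + 1

def quantum_dice_moves (position : Int) : List (Int × Int) :=
  [(moveP position 3, 1), (moveP position 4, 3), (moveP position 5, 6), (moveP position 6, 7),
   (moveP position 7, 6), (moveP position 8, 3), (moveP position 9, 1)]

-- the assert 'a_score < 21 and b_score < 21' is Pre_'s to exclude (A raises AssertionError there)
def quantum_step (universes : List (Int × Int × Int × Int × Int × Int)) : List (Bool × Int × Int × Int × Int × Int) :=
  let next := universes.foldl (fun nd u =>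
    match u with
    | (a_turn, a_pos, a_score, b_pos, b_score, count) =>
      if a_turn ≠ 0 then
        (quantum_dice_moves a_pos).foldl
          (fun nd pc => ddAdd nd (false, pc.1, a_score + pc.1, b_pos, b_score) (count * pc.2)) nd
      else
        (quantum_dice_moves b_pos).foldl
          (fun nd pc => ddAdd nd (true, a_pos, a_score, pc.1, b_score + pc.1) (count * pc.2)) nd)
    PySem.Dict.empty
  next.items.map (fun p => (p.1.1, p.1.2.1, p.1.2.2.1, p.1.2.2.2.1, p.1.2.2.2.2, p.2))

-- ===== PORT B =====
def quantum_step_alt (universes : List (Int × Int × Int × Int × Int × Int)) : List (Bool × Int × Int × Int × Int × Int) :=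
  let contributions : List (QKey × Int) := universes.foldl (fun acc u =>
    match u with
    | (a_turn, a_pos, a_score, b_pos, b_score, count) =>
      ([1, 2, 3] : List Int).foldl (fun acc d1 =>
        ([1, 2, 3] : List Int).foldl (fun acc d2 =>
          ([1, 2, 3] : List Int).foldl (fun acc d3 =>
            let p := moveP (if a_turn ≠ 0 then a_pos else b_pos) (d1 + d2 + d3)
            let newKey : QKey := if a_turn ≠ 0 then (false, p, a_score + p, b_pos, b_score)
                                 else (true, a_pos, a_score, p, b_score + p)
            acc ++ [(newKey, count)]) acc) acc) acc) []
  let next := contributions.foldl (fun nd kc => ddAdd nd kc.1 kc.2) PySem.Dict.empty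
  next.items.map (fun p => (p.1.1, p.1.2.1, p.1.2.2.1, p.1.2.2.2.1, p.1.2.2.2.2, p.2))

-- ===== PRECONDITION & SPEC =====
-- A's assert raises unless every universe has both scores < 21; the Nodup clause is the dict representation
-- invariant (the argument is a Python dict, whose keys are necessarily distinct).
def Pre_quantum_step (universes : List (Int × Int × Int × Int × Int × Int)) : Prop :=
  (∀ u ∈ universes, u.2.2.1 < 21 ∧ u.2.2.2.2.1 < 21) ∧
  (universes.map (fun u => (u.1, u.2.1, u.2.2.1, u.2.2.2.1, u.2.2.2.2.1))).Nodup
instance (universes : List (Int × Int × Int × Int × Int × Int)) : Decidable (Pre_quantum_step universes) := by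
  unfold Pre_quantum_step; infer_instance

def pvWitness_quantum_step : (List (Int × Int × Int × Int × Int × Int)) :=
  [(1, 4, 0, 8, 0, 1), (0, 4, 10, 8, 17, 3)]

def Spec_quantum_step (universes : List (Int × Int × Int × Int × Int × Int)) (out : List (Bool × Int × Int × Int × Int × Int)) : Prop := out = quantum_step_alt universes
instance (universes : List (Int × Int × Int × Int × Int × Int)) (out : List (Bool × Int × Int × Int × Int × Int)) : Decidable (Spec_quantum_step universes out) := by unfold Spec_quantum_step; infer_instance

-- ===== CLAIM (what is proved, stated in full; the proofs are below) =====
def Claim_equal_quantum_step : Prop := ∀ (universes : List (Int × Int × Int × Int × Int × Int)), Dom_quantum_step universes → Pre_quantum_step universes → Spec_quantum_step universes (quantum_step universes)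

-- ===== LEMMAS AND PROOFS =====

-- proof-side vocabulary: fold steps, weight sums, first-occurrence aggregation of a (sum, weight) list
def aggStep (nd : PySem.Dict QKey Int) (kc : QKey × Int) : PySem.Dict QKey Int := ddAdd nd kc.1 kc.2

def stepK (k : Int → QKey) (c : Int) (nd : PySem.Dict QKey Int) (sw : Int × Int) : PySem.Dict QKey Int :=
  ddAdd nd (k sw.1) (c * sw.2)

def sumW (s : Int) (L : List (Int × Int)) : Int := ((L.filter (fun p => p.1 == s)).map (fun p => p.2)).sum

def canonF : Nat → List (Int × Int) → List (Int × Int)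
  | _, [] => []
  | 0, _ :: _ => []            -- never reached when the fuel is ≥ the list length
  | n + 1, (s, w) :: L => (s, w + sumW s L) :: canonF n (L.filter (fun p => !(p.1 == s)))

-- the 27 raw rolls of B (as (sum, weight 1)) and the 7-entry table of A
def L27 : List (Int × Int) :=
  [(3,1),(4,1),(5,1),(4,1),(5,1),(6,1),(5,1),(6,1),(7,1),(4,1),(5,1),(6,1),(5,1),(6,1),(7,1),
   (6,1),(7,1),(8,1),(5,1),(6,1),(7,1),(6,1),(7,1),(8,1),(7,1),(8,1),(9,1)]

def L7 : List (Int × Int) := [(3,1),(4,3),(5,6),(6,7),(7,6),(8,3),(9,1)]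

lemma canon_L27 : canonF 27 L27 = L7 := by decide

-- the two per-universe key maps (sum ↦ successor-universe key)
abbrev kT (a_pos a_score b_pos b_score : Int) : Int → QKey :=
  fun s => (false, moveP a_pos s, a_score + moveP a_pos s, b_pos, b_score)
abbrev kF (a_pos a_score b_pos b_score : Int) : Int → QKey :=
  fun s => (true, a_pos, a_score, moveP b_pos s, b_score + moveP b_pos s)

lemma ddAdd_contains_self (d : PySem.Dict QKey Int) (k : QKey) (v : Int) :
    (ddAdd d k v).contains k = true := by
  simp [ddAdd, PySem.Dict.contains_insert_self]

lemma ddAdd_contains_mono (d : PySem.Dict QKey Int) (k k' : QKey) (v : Int)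
    (h : d.contains k' = true) : (ddAdd d k v).contains k' = true := by
  simp [ddAdd, PySem.Dict.contains_insert, h]

lemma ddAdd_nodup (d : PySem.Dict QKey Int) (k : QKey) (v : Int)
    (h : d.keys.Nodup) : (ddAdd d k v).keys.Nodup := by
  exact PySem.Dict.nodup_keys_insert _ _ _ h -- ddAdd unfolds

lemma ddAdd_same (d : PySem.Dict QKey Int) (k : QKey) (a b : Int) :
    ddAdd (ddAdd d k a) k b = ddAdd d k (a + b) := by
  simp [ddAdd, PySem.Dict.getD_insert_self, PySem.Dict.insert_insert_self, add_assoc]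

lemma ddAdd_comm (d : PySem.Dict QKey Int) (k₀ k' : QKey) (v w : Int)
    (h : d.contains k₀ = true) :
    ddAdd (ddAdd d k₀ v) k' w = ddAdd (ddAdd d k' w) k₀ v := by
  by_cases hk : k' = k₀
  · subst hk; rw [ddAdd_same, ddAdd_same, add_comm]
  · have h1 : (ddAdd d k₀ v).getD k' 0 = d.getD k' 0 := PySem.Dict.getD_insert_of_ne _ _ _ hk
    have h2 : (ddAdd d k' w).getD k₀ 0 = d.getD k₀ 0 :=
      PySem.Dict.getD_insert_of_ne _ _ _ (Ne.symm hk)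
    show (ddAdd d k₀ v).insert k' ((ddAdd d k₀ v).getD k' 0 + w)
        = (ddAdd d k' w).insert k₀ ((ddAdd d k' w).getD k₀ 0 + v)
    rw [h1, h2]
    apply PySem.Dict.ext
    by_cases hck : d.contains k' = true
    · have hck0 : (d.insert k₀ (d.getD k₀ 0 + v)).contains k' = true := by
        simp [PySem.Dict.contains_insert, hck]
      have hck0' : (d.insert k' (d.getD k' 0 + w)).contains k₀ = true := by
        simp [PySem.Dict.contains_insert, h]
      simp only [ddAdd]
      rw [PySem.Dict.items_insert_of_contains _ _ hck0,
        PySem.Dict.items_insert_of_contains _ _ h,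
        PySem.Dict.items_insert_of_contains _ _ hck0',
        PySem.Dict.items_insert_of_contains _ _ hck,
        List.map_map, List.map_map]
      apply List.map_congr_left
      intro p _
      by_cases hp0 : p.1 = k₀ <;> by_cases hp1 : p.1 = k' <;>
        simp_all [Function.comp]
    · have hckb : d.contains k' = false := by simpa using hck
      have hck0 : (d.insert k₀ (d.getD k₀ 0 + v)).contains k' = false := by
        simp [PySem.Dict.contains_insert, hckb, hk]
      have hck0' : (d.insert k' (d.getD k' 0 + w)).contains k₀ = true := by
        simp [PySem.Dict.contains_insert, h]
      simp only [ddAdd]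
      rw [PySem.Dict.items_insert_of_not_contains _ _ hck0,
        PySem.Dict.items_insert_of_contains _ _ h,
        PySem.Dict.items_insert_of_contains _ _ hck0',
        PySem.Dict.items_insert_of_not_contains _ _ hckb,
        List.map_append]
      simp [hk]

lemma ddAdd_zero (d : PySem.Dict QKey Int) (k : QKey)
    (h : d.contains k = true) (hnd : d.keys.Nodup) : ddAdd d k 0 = d := by
  show d.insert k (d.getD k 0 + 0) = d
  rw [add_zero]
  apply PySem.Dict.ext
  rw [PySem.Dict.items_insert_of_contains _ _ h]
  conv_rhs => rw [← List.map_id d.items]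
  apply List.map_congr_left
  intro p hp
  obtain ⟨p1, p2⟩ := p
  by_cases hpk : p1 = k
  · have hv : d.getD p1 0 = p2 := PySem.Dict.getD_of_mem_items _ (by simpa using hp) hnd _
    subst hpk
    simp [hv]
  · simp [hpk]

-- later occurrences of sum s merge into the first occurrence (key k s already present)
lemma foldl_merge (k : Int → QKey) (c s : Int) :
    ∀ (L : List (Int × Int)) (d : PySem.Dict QKey Int) (v : Int), d.contains (k s) = true →
      L.foldl (stepK k c) (ddAdd d (k s) v)
        = (L.filter (fun p => !(p.1 == s))).foldl (stepK k c) (ddAdd d (k s) (v + c * sumW s L)) := by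
  intro L
  induction L with
  | nil => intro d v h; simp [sumW]
  | cons sw L ih =>
      intro d v h
      obtain ⟨s', w'⟩ := sw
      by_cases hs : s' = s
      · subst hs
        have step1 : stepK k c (ddAdd d (k s') v) (s', w') = ddAdd d (k s') (v + c * w') := by
          simp [stepK, ddAdd_same]
        have hsum : sumW s' ((s', w') :: L) = w' + sumW s' L := by simp [sumW]
        have hfil : ((s', w') :: L).filter (fun p => !(p.1 == s')) = L.filter (fun p => !(p.1 == s')) := by
          simp [List.filter]
        rw [List.foldl_cons, step1, ih _ _ h, hfil, hsum]
        have : v + c * w' + c * sumW s' L = v + c * (w' + sumW s' L) := by ring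
        rw [this]
      · have hbeq : (s' == s) = false := by simpa using fun hx => hs (by exact_mod_cast hx)
        have step1 : stepK k c (ddAdd d (k s) v) (s', w')
            = ddAdd (stepK k c d (s', w')) (k s) v := by
          simp only [stepK]
          exact ddAdd_comm _ _ _ _ _ h
        have hsum : sumW s ((s', w') :: L) = sumW s L := by simp [sumW, hbeq]
        have hfil : ((s', w') :: L).filter (fun p => !(p.1 == s))
            = (s', w') :: L.filter (fun p => !(p.1 == s)) := by simp [List.filter, hbeq]
        rw [List.foldl_cons, step1,
          ih (stepK k c d (s', w')) v (ddAdd_contains_mono _ _ _ _ h), hfil, hsum,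
          List.foldl_cons]
        congr 1
        show _ = stepK k c (ddAdd d (k s) (v + c * sumW s L)) (s', w')
        simp only [stepK]
        exact (ddAdd_comm _ _ _ _ _ h).symm

lemma foldl_canon (k : Int → QKey) (c : Int) :
    ∀ (n : Nat) (L : List (Int × Int)), L.length ≤ n → ∀ (d : PySem.Dict QKey Int), d.keys.Nodup →
      L.foldl (stepK k c) d = (canonF n L).foldl (stepK k c) d := by
  intro n
  induction n with
  | zero =>
      intro L hL d _
      have : L = [] := List.eq_nil_of_length_eq_zero (Nat.le_zero.mp hL)
      subst this; rfl
  | succ n ih =>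
      intro L hL d hnd
      match L with
      | [] => rfl
      | (s, w) :: L =>
        have hlen : (L.filter (fun p => !(p.1 == s))).length ≤ n :=
          le_trans (List.length_filter_le _ _) (by simpa using hL)
        have hd' : (ddAdd d (k s) (c * w)).contains (k s) = true := ddAdd_contains_self _ _ _
        have hnd' : (ddAdd d (k s) (c * w)).keys.Nodup := ddAdd_nodup _ _ _ hnd
        calc ((s, w) :: L).foldl (stepK k c) d
            = L.foldl (stepK k c) (ddAdd d (k s) (c * w)) := by rw [List.foldl_cons]; rfl
          _ = L.foldl (stepK k c) (ddAdd (ddAdd d (k s) (c * w)) (k s) 0) := by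
              rw [ddAdd_zero _ _ hd' hnd']
          _ = (L.filter (fun p => !(p.1 == s))).foldl (stepK k c)
                (ddAdd (ddAdd d (k s) (c * w)) (k s) (0 + c * sumW s L)) :=
              foldl_merge k c s L _ 0 hd'
          _ = (L.filter (fun p => !(p.1 == s))).foldl (stepK k c)
                (ddAdd d (k s) (c * (w + sumW s L))) := by
              rw [zero_add, ddAdd_same]
              have : c * w + c * sumW s L = c * (w + sumW s L) := by ring
              rw [this]
          _ = (canonF n (L.filter (fun p => !(p.1 == s)))).foldl (stepK k c)
                (ddAdd d (k s) (c * (w + sumW s L))) :=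
              ih _ hlen _ (ddAdd_nodup _ _ _ hnd)
          _ = (canonF (n + 1) ((s, w) :: L)).foldl (stepK k c) d := by
              rw [canonF, List.foldl_cons]; rfl

-- aggregating B's 27 equal-weight contributions equals A's 7-entry weighted fold
lemma perU (g : Int → QKey) (c : Int) (nd : PySem.Dict QKey Int) (hnd : nd.keys.Nodup) :
    (L27.map (fun sw => (g sw.1, c))).foldl aggStep nd = L7.foldl (stepK g c) nd := by
  have h1 : ∀ x ∈ L27, x.2 = 1 := by
    intro x hx
    have := List.all_eq_true.mp (by decide : L27.all (fun p => p.2 == 1) = true) x hx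
    simpa using this
  rw [List.foldl_map]
  rw [PySem.List.foldl_congr_mem L27 _ (stepK g c) nd
    (fun acc x hx => by simp [aggStep, stepK, h1 x hx])]
  rw [foldl_canon g c 27 L27 (by decide) nd hnd, canon_L27]

-- B's triple loop appends exactly the 27 contributions (then-branch / else-branch)
lemma triple_append (g : Int → QKey) (c : Int) (acc : List (QKey × Int)) :
    ([1, 2, 3] : List Int).foldl (fun acc d1 =>
      ([1, 2, 3] : List Int).foldl (fun acc d2 =>
        ([1, 2, 3] : List Int).foldl (fun acc d3 =>
          acc ++ [(g (d1 + d2 + d3), c)]) acc) acc) acc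
      = acc ++ L27.map (fun sw => (g sw.1, c)) := by
  simp [L27, List.foldl]

-- the two ports' per-universe fold steps, named for the assembly proof
def aStep (nd : PySem.Dict QKey Int) (u : Int × Int × Int × Int × Int × Int) : PySem.Dict QKey Int :=
  match u with
  | (a_turn, a_pos, a_score, b_pos, b_score, count) =>
    if a_turn ≠ 0 then
      (quantum_dice_moves a_pos).foldl
        (fun nd pc => ddAdd nd (false, pc.1, a_score + pc.1, b_pos, b_score) (count * pc.2)) nd
    else
      (quantum_dice_moves b_pos).foldl
        (fun nd pc => ddAdd nd (true, a_pos, a_score, pc.1, b_score + pc.1) (count * pc.2)) nd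

def bStep (acc : List (QKey × Int)) (u : Int × Int × Int × Int × Int × Int) : List (QKey × Int) :=
  match u with
  | (a_turn, a_pos, a_score, b_pos, b_score, count) =>
    ([1, 2, 3] : List Int).foldl (fun acc d1 =>
      ([1, 2, 3] : List Int).foldl (fun acc d2 =>
        ([1, 2, 3] : List Int).foldl (fun acc d3 =>
          let p := moveP (if a_turn ≠ 0 then a_pos else b_pos) (d1 + d2 + d3)
          let newKey : QKey := if a_turn ≠ 0 then (false, p, a_score + p, b_pos, b_score)
                               else (true, a_pos, a_score, p, b_score + p)
          acc ++ [(newKey, count)]) acc) acc) acc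

def bList (u : Int × Int × Int × Int × Int × Int) : List (QKey × Int) :=
  match u with
  | (a_turn, a_pos, a_score, b_pos, b_score, count) =>
    if a_turn ≠ 0 then L27.map (fun sw => (kT a_pos a_score b_pos b_score sw.1, count))
    else L27.map (fun sw => (kF a_pos a_score b_pos b_score sw.1, count))

lemma nodup_foldl_aggStep (acc : List (QKey × Int)) (nd : PySem.Dict QKey Int)
    (h : nd.keys.Nodup) : (acc.foldl aggStep nd).keys.Nodup := by
  induction acc generalizing nd with
  | nil => simpa using h
  | cons kc acc ih => exact ih _ (ddAdd_nodup _ _ _ h)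

lemma build_eq (acc : List (QKey × Int)) (u : Int × Int × Int × Int × Int × Int) :
    bStep acc u = acc ++ bList u := by
  obtain ⟨a_turn, a_pos, a_score, b_pos, b_score, count⟩ := u
  by_cases ht : a_turn ≠ 0
  · have := triple_append (kT a_pos a_score b_pos b_score) count acc
    simpa [bStep, bList, ht] using this
  · have := triple_append (kF a_pos a_score b_pos b_score) count acc
    simpa [bStep, bList, ht] using this

lemma uStep (u : Int × Int × Int × Int × Int × Int) (nd : PySem.Dict QKey Int)
    (hnd : nd.keys.Nodup) : (bList u).foldl aggStep nd = aStep nd u := by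
  obtain ⟨a_turn, a_pos, a_score, b_pos, b_score, count⟩ := u
  simp only [bList, aStep]
  by_cases ht : a_turn ≠ 0
  · rw [if_pos ht, if_pos ht, perU (kT a_pos a_score b_pos b_score) count nd hnd]
    simp only [L7, quantum_dice_moves, List.foldl_cons, List.foldl_nil, stepK, kT]
  · rw [if_neg ht, if_neg ht, perU (kF a_pos a_score b_pos b_score) count nd hnd]
    simp only [L7, quantum_dice_moves, List.foldl_cons, List.foldl_nil, stepK, kF]

lemma main_aux : ∀ (us : List (Int × Int × Int × Int × Int × Int)) (acc : List (QKey × Int))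
    (nd : PySem.Dict QKey Int), nd.keys.Nodup →
    (us.foldl bStep acc).foldl aggStep nd = us.foldl aStep (acc.foldl aggStep nd) := by
  intro us
  induction us with
  | nil => intro acc nd _; rfl
  | cons u us ih =>
      intro acc nd hnd
      rw [List.foldl_cons, ih _ _ hnd, List.foldl_cons, build_eq, List.foldl_append,
        uStep u _ (nodup_foldl_aggStep acc nd hnd)]

theorem quantum_step_spec : Claim_equal_quantum_step := by
  intro us _ _
  unfold Spec_quantum_step
  show (us.foldl aStep PySem.Dict.empty).items.map
        (fun p => (p.1.1, p.1.2.1, p.1.2.2.1, p.1.2.2.2.1, p.1.2.2.2.2, p.2))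
      = ((us.foldl bStep []).foldl aggStep PySem.Dict.empty).items.map
        (fun p => (p.1.1, p.1.2.1, p.1.2.2.1, p.1.2.2.2.1, p.1.2.2.2.2, p.2))
  rw [main_aux us [] PySem.Dict.empty (PySem.Dict.nodup_keys_empty)]
  rfl
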